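-- pv_equiv track=rewrite | github.com/chaichontat/samui | loopy/image.py | _gen_zcounts
-- ===== SOURCE A (Python) =====
-- def _gen_zcounts(nc: int):
--     if nc <= 0:
--         raise ValueError("nchannels must be greater than 0")
--     if nc >= 1000:
--         raise ValueError(
--             "nchannels is tested up to 1000. Perhaps you mixed up nchannels and other dimensions?"
--         )
--
--     if nc <= 3:
--         names = [""]
--         ncounts = [nc]
--         chanlist = [list(range(nc))]
--     else:
--         names = [f"_{i}" for i in range(1, (nc - 1) // 3 + 2)]
--         ncounts = [3] * (nc // 3) + ([nc % 3] if nc % 3 else [])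
--         chanlist = [list(range(3 * i, 3 * (i + 1))) for i in range(nc // 3)] + (
--             [list(range(3 * (nc // 3), nc))] if nc % 3 else []
--         )
--
--     return names, ncounts, chanlist
-- ===== SOURCE B (Python) =====
-- def _gen_zcounts(nc: int):
--     if nc <= 0:
--         raise ValueError("nchannels must be greater than 0")
--     if nc >= 1000:
--         raise ValueError(
--             "nchannels is tested up to 1000. Perhaps you mixed up nchannels and other dimensions?"
--         )
--
--     if nc <= 3:
--         return [""], [nc], [list(range(nc))]
--
--     # One pass over the channels: push each index into the current group,
--     # flush the group whenever it reaches size 3, keep a non-empty tail.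
--     chanlist = []
--     cur = []
--     for i in range(nc):
--         cur = cur + [i]
--         if len(cur) == 3:
--             chanlist.append(cur)
--             cur = []
--     if cur:
--         chanlist.append(cur)
--
--     # Names and counts fall out of the built group list.
--     names = []
--     ncounts = []
--     for k, chunk in enumerate(chanlist, 1):
--         names.append(f"_{k}")
--         ncounts.append(len(chunk))
--     return names, ncounts, chanlist
-- ===== Notes on version B (the rewrite author's own statement) =====
-- stated objective: alternative
-- what changed: Replaces A's three independent modulo-based range comprehensions with a single element-wise pass that pushes each channel index into a current group and flushes it at size 3, then derives names and counts by enumerating the built group list.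
import Mathlib
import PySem

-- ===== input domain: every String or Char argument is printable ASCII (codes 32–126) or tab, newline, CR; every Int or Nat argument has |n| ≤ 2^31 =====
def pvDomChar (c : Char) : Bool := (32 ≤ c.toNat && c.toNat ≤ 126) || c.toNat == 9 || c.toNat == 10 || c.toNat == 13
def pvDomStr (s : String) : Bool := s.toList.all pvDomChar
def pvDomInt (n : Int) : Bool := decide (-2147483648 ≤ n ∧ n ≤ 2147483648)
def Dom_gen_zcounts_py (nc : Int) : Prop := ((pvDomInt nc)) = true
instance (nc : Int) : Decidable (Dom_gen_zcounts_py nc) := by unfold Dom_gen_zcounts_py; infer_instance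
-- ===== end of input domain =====

-- B replaces A's three modulo-based comprehensions with one element-wise pass that pushes each
-- channel index into a current group, flushing at size 3, and enumerates the groups for names/counts.

-- ===== PORT A =====
def gen_zcounts_py (nc : Int) : List String × List Int × List (List Int) :=
  if nc ≤ 3 then
    ([""], [nc], [PySem.List.pyRange 0 nc 1])
  else
    ((PySem.List.pyRange 1 (PySem.Int.floordiv (nc - 1) 3 + 2) 1).map
        (fun i => "_" ++ PySem.Int.toStr i),
     List.replicate (PySem.Int.floordiv nc 3).toNat 3 ++
       (if PySem.Int.mod nc 3 ≠ 0 then [PySem.Int.mod nc 3] else []),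
     (PySem.List.pyRange 0 (PySem.Int.floordiv nc 3) 1).map
        (fun i => PySem.List.pyRange (3 * i) (3 * (i + 1)) 1) ++
       (if PySem.Int.mod nc 3 ≠ 0 then [PySem.List.pyRange (3 * PySem.Int.floordiv nc 3) nc 1] else []))

-- ===== PORT B =====
-- the loop body of Source B: cur = cur + [i]; if len(cur) == 3: chanlist.append(cur); cur = []
def bStep (st : List (List Int) × List Int) (i : Int) : List (List Int) × List Int :=
  let cur := st.2 ++ [i]
  if cur.length = 3 then (st.1 ++ [cur], []) else (st.1, cur)

def gen_zcounts_py_alt (nc : Int) : List String × List Int × List (List Int) :=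
  if nc ≤ 3 then
    ([""], [nc], [PySem.List.pyRange 0 nc 1])
  else
    let st := (PySem.List.pyRange 0 nc 1).foldl bStep ([], [])
    let chanlist := if st.2 ≠ [] then st.1 ++ [st.2] else st.1
    let nn := (PySem.List.enumerate chanlist 1).foldl
        (fun (p : List String × List Int) kc =>
          (p.1 ++ ["_" ++ PySem.Int.toStr kc.1], p.2 ++ [(kc.2.length : Int)])) ([], [])
    (nn.1, nn.2, chanlist)

-- ===== PRECONDITION & SPEC =====
-- Pre_ excludes exactly the inputs on which A raises ValueError: nc <= 0 and nc >= 1000.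
def Pre_gen_zcounts_py (nc : Int) : Prop := 1 ≤ nc ∧ nc ≤ 999
instance (nc : Int) : Decidable (Pre_gen_zcounts_py nc) := by unfold Pre_gen_zcounts_py; infer_instance
def pvWitness_gen_zcounts_py : Int := (7)

def Spec_gen_zcounts_py (nc : Int) (out : List String × List Int × List (List Int)) : Prop := out = gen_zcounts_py_alt nc
instance (nc : Int) (out : List String × List Int × List (List Int)) : Decidable (Spec_gen_zcounts_py nc out) := by unfold Spec_gen_zcounts_py; infer_instance

-- ===== CLAIM (what is proved, stated in full; the proofs are below) =====
def Claim_equal_gen_zcounts_py : Prop := ∀ (nc : Int), Dom_gen_zcounts_py nc → Pre_gen_zcounts_py nc → Spec_gen_zcounts_py nc (gen_zcounts_py nc)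

-- ===== LEMMAS AND PROOFS =====

-- B's element-wise pass, started at a multiple of 3, yields A's full chunks plus the partial tail group.
theorem bFold_eq (k : Nat) (nc : Int) (acc : List (List Int)) (hk : 3 * (k : Int) ≤ nc) :
    (PySem.List.pyRange (3 * (k : Int)) nc 1).foldl bStep (acc, []) =
      (acc ++ (PySem.List.pyRange (k : Int) (nc / 3) 1).map
          (fun i => PySem.List.pyRange (3 * i) (3 * (i + 1)) 1),
       PySem.List.pyRange (3 * (nc / 3)) nc 1) := by
  by_cases hful : 3 * (k : Int) + 3 ≤ nc
  · -- a full group of three is flushed, recurse at k+1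
    rw [PySem.List.pyRange_one_cons (by omega : 3 * (k : Int) < nc),
        PySem.List.pyRange_one_cons (by omega : 3 * (k : Int) + 1 < nc),
        PySem.List.pyRange_one_cons (by omega : 3 * (k : Int) + 1 + 1 < nc)]
    simp only [List.foldl_cons, bStep, List.nil_append, List.length_cons, List.length_nil,
      List.length_append]
    norm_num
    have hrec := bFold_eq (k + 1) nc
        (acc ++ [[3 * (k : Int), 3 * (k : Int) + 1, 3 * (k : Int) + 1 + 1]])
        (by push_cast; omega)
    push_cast at hrec
    rw [show (3 : Int) * ((k : Int) + 1) = 3 * (k : Int) + 1 + 1 + 1 from by ring] at hrec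
    rw [hrec]
    have hkq : (k : Int) < nc / 3 := by omega
    rw [PySem.List.pyRange_one_cons hkq, List.map_cons]
    have hchunk : PySem.List.pyRange (3 * (k : Int)) (3 * ((k : Int) + 1)) 1 =
        [3 * (k : Int), 3 * (k : Int) + 1, 3 * (k : Int) + 1 + 1] := by
      rw [PySem.List.pyRange_one_cons (by omega),
          PySem.List.pyRange_one_cons (by omega),
          PySem.List.pyRange_one_cons (by omega),
          PySem.List.pyRange_one_eq_nil (by omega)]
    rw [hchunk]
    simp
  · -- fewer than three channels remain: they stay in the tail group
    have hq : nc / 3 = (k : Int) := by omega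
    rw [hq, PySem.List.pyRange_one_eq_nil (le_refl ((k : Int))), List.map_nil, List.append_nil]
    rcases (by omega : nc = 3 * (k : Int) ∨ nc = 3 * (k : Int) + 1 ∨ nc = 3 * (k : Int) + 2) with h | h | h
    · subst h
      rw [PySem.List.pyRange_one_eq_nil (le_refl _)]
      simp
    · subst h
      rw [PySem.List.pyRange_one_cons (by omega),
          PySem.List.pyRange_one_eq_nil (by omega)]
      simp [bStep]
    · subst h
      rw [PySem.List.pyRange_one_cons (by omega),
          PySem.List.pyRange_one_cons (by omega),
          PySem.List.pyRange_one_eq_nil (by omega)]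
      simp [bStep]
termination_by (nc - 3 * (k : Int)).toNat
decreasing_by omega

-- B's second loop over enumerate(chanlist, s) produces the name range and the length map.
theorem nameFold_eq (l : List (List Int)) (s : Int) (ns : List String) (cs : List Int) :
    (PySem.List.enumerate l s).foldl
        (fun (p : List String × List Int) kc =>
          (p.1 ++ ["_" ++ PySem.Int.toStr kc.1], p.2 ++ [(kc.2.length : Int)])) (ns, cs) =
      (ns ++ (PySem.List.pyRange s (s + l.length) 1).map (fun k => "_" ++ PySem.Int.toStr k),
       cs ++ l.map (fun c => (c.length : Int))) := by
  induction l generalizing s ns cs with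
  | nil => simp [PySem.List.enumerate_nil, PySem.List.pyRange_one_eq_nil (le_refl s)]
  | cons x xs ih =>
    rw [PySem.List.enumerate_cons, List.foldl_cons, ih]
    rw [PySem.List.pyRange_one_cons
      (by simp only [List.length_cons]; push_cast; omega : s < s + ((x :: xs).length : Int))]
    rw [List.map_cons, List.map_cons]
    have hlen : s + ((x :: xs).length : Int) = (s + 1) + (xs.length : Int) := by
      simp only [List.length_cons]; push_cast; omega
    rw [hlen]
    simp

theorem gen_zcounts_py_spec : Claim_equal_gen_zcounts_py := by
  intro nc _ hpre
  unfold Spec_gen_zcounts_py gen_zcounts_py gen_zcounts_py_alt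
  obtain ⟨h1, h999⟩ := hpre
  by_cases h3 : nc ≤ 3
  · simp [h3]
  · simp only [if_neg h3]
    have h0 : (0 : Int) < nc := by omega
    have hfd : PySem.Int.floordiv nc 3 = nc / 3 :=
      PySem.Int.floordiv_eq_ediv_of_pos (by omega)
    have hfd1 : PySem.Int.floordiv (nc - 1) 3 = (nc - 1) / 3 :=
      PySem.Int.floordiv_eq_ediv_of_pos (by omega)
    have hmd : PySem.Int.mod nc 3 = nc % 3 :=
      PySem.Int.mod_eq_emod_of_pos (by omega)
    have hfold := bFold_eq 0 nc [] (by omega)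
    simp only [Nat.cast_zero, mul_zero, List.nil_append] at hfold
    rw [hfold]
    -- the tail group is non-empty exactly when nc % 3 ≠ 0
    have htail : (PySem.List.pyRange (3 * (nc / 3)) nc 1 ≠ []) ↔ nc % 3 ≠ 0 := by
      rcases eq_or_ne (nc % 3) 0 with hr | hr
      · simp [hr, PySem.List.pyRange_one_eq_nil (by omega : nc ≤ 3 * (nc / 3))]
      · simp only [hr, ne_eq, not_false_eq_true, iff_true]
        rw [PySem.List.pyRange_one_cons (by omega : 3 * (nc / 3) < nc)]
        exact List.cons_ne_nil _ _
    set full := (PySem.List.pyRange 0 (nc / 3) 1).map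
        (fun i => PySem.List.pyRange (3 * i) (3 * (i + 1)) 1) with hfulldef
    have hch : (if PySem.List.pyRange (3 * (nc / 3)) nc 1 ≠ [] then
          full ++ [PySem.List.pyRange (3 * (nc / 3)) nc 1] else full) =
        full ++ (if nc % 3 ≠ 0 then [PySem.List.pyRange (3 * (nc / 3)) nc 1] else []) := by
      rcases eq_or_ne (nc % 3) 0 with hr | hr
      · have hnil : PySem.List.pyRange (3 * (nc / 3)) nc 1 = [] :=
          PySem.List.pyRange_one_eq_nil (by omega)
        simp [hr, hnil]
      · simp [hr, htail.mpr hr]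
    rw [hch, nameFold_eq]
    set chan := full ++ (if nc % 3 ≠ 0 then [PySem.List.pyRange (3 * (nc / 3)) nc 1] else [])
      with hchandef
    have hlenchan : (chan.length : Int) = (nc - 1) / 3 + 1 := by
      rw [hchandef, hfulldef]
      rcases eq_or_ne (nc % 3) 0 with hr | hr
      · simp [hr, PySem.List.length_pyRange_one]; omega
      · simp [hr, PySem.List.length_pyRange_one]; omega
    have hcnt : chan.map (fun c => ((c.length : Int))) =
        List.replicate (nc / 3).toNat 3 ++ (if nc % 3 ≠ 0 then [nc % 3] else []) := by
      rw [hchandef, hfulldef, List.map_append]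
      congr 1
      · rw [List.map_map]
        have hmap : ((PySem.List.pyRange 0 (nc / 3) 1).map
            ((fun c : List Int => ((c.length : Int))) ∘
              (fun i => PySem.List.pyRange (3 * i) (3 * (i + 1)) 1))) =
            (PySem.List.pyRange 0 (nc / 3) 1).map (fun _ => (3 : Int)) := by
          apply List.map_congr_left
          intro i _
          simp only [Function.comp_apply, PySem.List.length_pyRange_one]
          have : 3 * (i + 1) - 3 * i = 3 := by ring
          rw [this]; rfl
        rw [hmap, List.map_const', PySem.List.length_pyRange_one]
        congr 1; omega
      · rcases eq_or_ne (nc % 3) 0 with hr | hr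
        · simp [hr]
        · simp [hr, PySem.List.length_pyRange_one]
          omega
    have hnames : (1 : Int) + (chan.length : Int) = (nc - 1) / 3 + 2 := by
      rw [hlenchan]; ring
    rw [hfd, hfd1, hmd, hcnt, hnames]
    simp [hchandef]
    exact hfulldef.symm
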